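-- pv_equiv track=rewrite | github.com/AbdurrahmanHabib/masaad-estimator | scripts/railway_monitor.py | scan_logs_for_errors
-- ===== SOURCE A (Python) =====
-- def scan_logs_for_errors(logs: list) -> list:
--     """Extract error lines from log entries."""
--     errors = []
--     error_keywords = [
--         "error", "Error", "ERROR", "failed", "FAILED", "fatal",
--         "FATAL", "exception", "Exception", "traceback", "Traceback",
--         "ModuleNotFoundError", "ImportError", "SyntaxError",
--         "TypeError", "ValueError", "KeyError", "AttributeError",
--         "cannot find", "not found", "permission denied", "ENOENT",
--         "npm ERR!", "exit code 1", "killed", "OOMKilled",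
--     ]
--     for log in (logs or []):
--         msg = log.get("message", "")
--         severity = log.get("severity", "").upper()
--         if severity in ("ERROR", "FATAL") or any(kw in msg for kw in error_keywords):
--             errors.append(msg.strip())
--     return errors
-- ===== SOURCE B (Python) =====
-- _ERROR_KEYWORDS = [
--     "error", "Error", "ERROR", "failed", "FAILED", "fatal",
--     "FATAL", "exception", "Exception", "traceback", "Traceback",
--     "ModuleNotFoundError", "ImportError", "SyntaxError",
--     "TypeError", "ValueError", "KeyError", "AttributeError",
--     "cannot find", "not found", "permission denied", "ENOENT",
--     "npm ERR!", "exit code 1", "killed", "OOMKilled",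
-- ]
--
-- # Multi-pattern matcher: index the keywords by their first character once,
-- # then walk the message a single time, only testing keywords that could
-- # possibly start at the current character.
-- _KEYWORDS_BY_FIRST_CHAR = {}
-- for _kw in _ERROR_KEYWORDS:
--     _KEYWORDS_BY_FIRST_CHAR.setdefault(_kw[0], []).append(_kw)
--
--
-- def _contains_error_keyword(msg):
--     return any(
--         msg.startswith(kw, i)
--         for i, c in enumerate(msg)
--         for kw in _KEYWORDS_BY_FIRST_CHAR.get(c, ())
--     )
--
--
-- def scan_logs_for_errors(logs: list) -> list:
--     """Extract error lines from log entries."""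
--     return [
--         log.get("message", "").strip()
--         for log in (logs or [])
--         if log.get("severity", "").upper() in ("ERROR", "FATAL")
--         or _contains_error_keyword(log.get("message", ""))
--     ]
-- ===== Notes on version B (the rewrite author's own statement) =====
-- stated objective: alternative
-- what changed: B replaces A's per-keyword substring search (any(kw in msg) over 26 keywords) with a multi-pattern matcher: keywords are indexed once by first character, and a single left-to-right pass over the message tests only the keywords that could start at the current character; the accumulator loop becomes a list comprehension.
import Mathlib
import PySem

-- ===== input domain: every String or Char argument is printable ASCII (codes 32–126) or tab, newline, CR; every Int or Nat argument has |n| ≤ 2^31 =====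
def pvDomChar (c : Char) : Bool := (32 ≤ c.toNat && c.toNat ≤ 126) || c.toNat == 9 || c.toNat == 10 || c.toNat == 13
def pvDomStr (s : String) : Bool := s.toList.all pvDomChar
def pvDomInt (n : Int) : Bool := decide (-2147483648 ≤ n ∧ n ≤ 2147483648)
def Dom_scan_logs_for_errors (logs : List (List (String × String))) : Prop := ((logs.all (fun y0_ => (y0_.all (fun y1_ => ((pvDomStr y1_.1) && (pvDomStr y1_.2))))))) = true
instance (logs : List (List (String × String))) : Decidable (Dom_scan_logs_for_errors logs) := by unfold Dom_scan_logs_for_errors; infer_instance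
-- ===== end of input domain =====

-- ===== PORT A =====
-- B: same result via a first-character-indexed multi-pattern keyword scan and a list comprehension (alternative, same worst-case cost).
-- The keyword list (A builds it inside the function; B's module shares the same literal).
def pvKeywords : List String :=
  ["error", "Error", "ERROR", "failed", "FAILED", "fatal",
   "FATAL", "exception", "Exception", "traceback", "Traceback",
   "ModuleNotFoundError", "ImportError", "SyntaxError",
   "TypeError", "ValueError", "KeyError", "AttributeError",
   "cannot find", "not found", "permission denied", "ENOENT",
   "npm ERR!", "exit code 1", "killed", "OOMKilled"]

-- A: accumulate `errors`, appending msg.strip() when severity in ("ERROR","FATAL") or any keyword is a substring.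
def pvStepA (errors : List String) (log : List (String × String)) : List String :=
  let msg := PySem.Dict.getD (PySem.Dict.mk log) "message" ""
  let severity := PySem.Str.upper (PySem.Dict.getD (PySem.Dict.mk log) "severity" "")
  if (severity == "ERROR" || severity == "FATAL")
      || pvKeywords.any (fun kw => PySem.Str.isIn kw msg) then
    errors ++ [PySem.Str.strip msg]
  else errors

def scan_logs_for_errors (logs : List (List (String × String))) : List String :=
  logs.foldl pvStepA []

-- ===== PORT B =====
-- B's module-level index: keywords grouped by first character (setdefault(kw[0], []).append(kw)
-- = modify with default []; kw[0] via headD — every keyword is a nonempty literal, so the default is never used).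
def pvByFirst : PySem.Dict Char (List String) :=
  pvKeywords.foldl (fun d kw => d.modify (kw.toList.headD ' ') [] (· ++ [kw])) PySem.Dict.empty

-- _contains_error_keyword: one pass over the message; at each position test only the keywords
-- whose first character is the current one (the nested any-comprehension, as structural recursion).
def pvScanKw : List Char → Bool
  | [] => false
  | c :: rest =>
    (PySem.Dict.getD pvByFirst c []).any (fun kw => PySem.Chars.startswith (c :: rest) kw.toList)
      || pvScanKw rest

def scan_logs_for_errors_alt (logs : List (List (String × String))) : List String :=
  logs.filterMap (fun log =>
    if (PySem.Str.upper (PySem.Dict.getD (PySem.Dict.mk log) "severity" "") == "ERROR"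
          || PySem.Str.upper (PySem.Dict.getD (PySem.Dict.mk log) "severity" "") == "FATAL")
        || pvScanKw (PySem.Dict.getD (PySem.Dict.mk log) "message" "").toList then
      some (PySem.Str.strip (PySem.Dict.getD (PySem.Dict.mk log) "message" ""))
    else none)

-- ===== PRECONDITION & SPEC =====
def Spec_scan_logs_for_errors (logs : List (List (String × String))) (out : List String) : Prop := out = scan_logs_for_errors_alt logs
instance (logs : List (List (String × String))) (out : List String) : Decidable (Spec_scan_logs_for_errors logs out) := by unfold Spec_scan_logs_for_errors; infer_instance

-- ===== CLAIM =====
def Claim_equal_scan_logs_for_errors : Prop := ∀ (logs : List (List (String × String))), Dom_scan_logs_for_errors logs → Spec_scan_logs_for_errors logs (scan_logs_for_errors logs)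

-- ===== LEMMAS AND PROOFS =====
-- The grouping fold, characterised: looking up c yields the keywords whose key is c, in order.
lemma pv_getD_group (l : List String) (d : PySem.Dict Char (List String)) (c : Char) :
    PySem.Dict.getD (l.foldl (fun d kw => d.modify (kw.toList.headD ' ') [] (· ++ [kw])) d) c []
      = PySem.Dict.getD d c [] ++ l.filter (fun kw => kw.toList.headD ' ' == c) := by
  induction l generalizing d with
  | nil => simp
  | cons kw l ih =>
    rw [List.foldl_cons, ih, PySem.Dict.getD_modify, List.filter_cons]
    by_cases h : kw.toList.head?.getD ' ' = c
    · simp [h]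
    · simp [h, Ne.symm h]

lemma pv_any_filter (l : List String) (p q : String → Bool) :
    (l.filter p).any q = l.any (fun x => p x && q x) := by
  induction l with
  | nil => rfl
  | cons x l ih =>
    rw [List.filter_cons]
    by_cases h : p x = true
    · simp [h, ih]
    · simp [h, ih]

-- Looking up the current character and testing only its group equals testing every keyword.
lemma pv_any_byFirst (c : Char) (t : List Char) :
    (PySem.Dict.getD pvByFirst c []).any (fun kw => PySem.Chars.startswith (c :: t) kw.toList)
      = pvKeywords.any (fun kw => PySem.Chars.startswith (c :: t) kw.toList) := by
  rw [show pvByFirst = pvKeywords.foldl (fun d kw => d.modify (kw.toList.headD ' ') [] (· ++ [kw])) PySem.Dict.empty from rfl,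
      pv_getD_group, PySem.Dict.getD_empty, List.nil_append, pv_any_filter]
  apply Bool.eq_iff_iff.mpr
  rw [List.any_eq_true, List.any_eq_true]
  constructor
  · rintro ⟨kw, hm, hb⟩
    simp only [Bool.and_eq_true] at hb
    exact ⟨kw, hm, hb.2⟩
  · rintro ⟨kw, hm, hsw⟩
    refine ⟨kw, hm, ?_⟩
    have hne : kw.toList ≠ [] := by
      have hall : ∀ kw ∈ pvKeywords, kw.toList ≠ [] := by decide
      exact hall kw hm
    have hpre : kw.toList <+: c :: t := (PySem.Chars.startswith_iff _ _).mp hsw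
    have hc : kw.toList.head?.getD ' ' = c := by
      cases hkl : kw.toList with
      | nil => exact absurd hkl hne
      | cons a as =>
        rw [hkl] at hpre
        obtain ⟨ha, -⟩ := List.cons_prefix_cons.mp hpre
        simp [ha]
    simp [hsw, hc]

-- B's position scan finds a keyword iff some keyword is a Python substring of the message.
lemma pvScanKw_eq (s : List Char) :
    pvScanKw s = pvKeywords.any (fun kw => PySem.Chars.isIn kw.toList s) := by
  induction s with
  | nil => decide
  | cons c t ih =>
    rw [pvScanKw, pv_any_byFirst, ih]
    apply Bool.eq_iff_iff.mpr
    simp only [Bool.or_eq_true, List.any_eq_true]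
    constructor
    · rintro (⟨kw, hm, hsw⟩ | ⟨kw, hm, hin⟩)
      · exact ⟨kw, hm, by
          rw [PySem.Chars.isIn_iff_infix]
          exact ((PySem.Chars.startswith_iff _ _).mp hsw).isInfix⟩
      · exact ⟨kw, hm, by
          rw [PySem.Chars.isIn_iff_infix] at hin ⊢
          exact hin.trans (List.suffix_cons c t).isInfix⟩
    · rintro ⟨kw, hm, hin⟩
      rw [PySem.Chars.isIn_iff_infix, List.infix_cons_iff] at hin
      rcases hin with hpre | hinf
      · exact Or.inl ⟨kw, hm, (PySem.Chars.startswith_iff _ _).mpr hpre⟩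
      · exact Or.inr ⟨kw, hm, (PySem.Chars.isIn_iff_infix _ _).mpr hinf⟩

lemma pv_cond_eq (msg : String) :
    pvKeywords.any (fun kw => PySem.Str.isIn kw msg) = pvScanKw msg.toList := by
  rw [pvScanKw_eq]
  simp [PySem.Str.isIn]

-- A's loop body decides exactly B's comprehension condition.
lemma pvStepA_eq (errors : List String) (log : List (String × String)) :
    pvStepA errors log =
      if (PySem.Str.upper (PySem.Dict.getD (PySem.Dict.mk log) "severity" "") == "ERROR"
            || PySem.Str.upper (PySem.Dict.getD (PySem.Dict.mk log) "severity" "") == "FATAL")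
          || pvScanKw (PySem.Dict.getD (PySem.Dict.mk log) "message" "").toList then
        errors ++ [PySem.Str.strip (PySem.Dict.getD (PySem.Dict.mk log) "message" "")]
      else errors := by
  simp only [pvStepA, pv_cond_eq]

lemma pv_foldl_eq (logs : List (List (String × String))) (acc : List String) :
    logs.foldl pvStepA acc = acc ++ scan_logs_for_errors_alt logs := by
  induction logs generalizing acc with
  | nil => simp [scan_logs_for_errors_alt]
  | cons log rest ih =>
    rw [List.foldl_cons, pvStepA_eq]
    simp only [scan_logs_for_errors_alt, List.filterMap_cons]
    by_cases h : ((PySem.Str.upper (PySem.Dict.getD (PySem.Dict.mk log) "severity" "") == "ERROR"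
        || PySem.Str.upper (PySem.Dict.getD (PySem.Dict.mk log) "severity" "") == "FATAL")
        || pvScanKw (PySem.Dict.getD (PySem.Dict.mk log) "message" "").toList) = true
    · rw [if_pos h, if_pos h, ih]
      simp [scan_logs_for_errors_alt]
    · rw [if_neg h, if_neg h, ih]
      simp [scan_logs_for_errors_alt]

-- ===== VERDICT =====
theorem scan_logs_for_errors_spec : Claim_equal_scan_logs_for_errors := by
  intro logs _
  show scan_logs_for_errors logs = scan_logs_for_errors_alt logs
  rw [scan_logs_for_errors, pv_foldl_eq, List.nil_append]
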